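-- pv_equiv track=rewrite | github.com/lockephi/Allentown-L104-Node | auto_fix_indents.py | fix_inconsistent_if_main_blocks
-- ===== SOURCE A (Python) =====
-- def fix_inconsistent_if_main_blocks(content):
--     """Fix if __name__ blocks where content is under-indented"""
--     lines = content.split('\n')
--     fixed_lines = []
--     in_main_block = False
--     main_indent = 0
--
--     for i, line in enumerate(lines):
--         if 'if __name__' in line and line.strip().startswith('if __name__'):
--             in_main_block = True
--             main_indent = len(line) - len(line.lstrip())
--             fixed_lines.append(line)
--             continue
--
--         if in_main_block and line.strip() and not line[0].isspace():
--             # Line at module level ends the __main__ block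
--             in_main_block = False
--
--         if in_main_block and line.strip():
--             current_indent = len(line) - len(line.lstrip())
--             expected_indent = main_indent + 4
--
--             # If line is under-indented, fix it
--             if current_indent < expected_indent and line.strip():
--                 spaces_needed = expected_indent - current_indent
--                 fixed_lines.append(' ' * spaces_needed + line)
--                 continue
--
--         fixed_lines.append(line)
--
--     return '\n'.join(fixed_lines)
-- ===== SOURCE B (Python) =====
-- def fix_inconsistent_if_main_blocks(content):
--     """Fix if __name__ blocks where content is under-indented"""
--     lines = content.split('\n')
--
--     def is_header(line):
--         return 'if __name__' in line and line.strip().startswith('if __name__')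
--
--     def indent_of(line):
--         return len(line) - len(line.lstrip())
--
--     def step(state, line):
--         # state BEFORE a line -> state before the next line
--         in_block, indent = state
--         if is_header(line):
--             return (True, indent_of(line))
--         if in_block and line.strip() and not line[0].isspace():
--             return (False, indent)
--         return state
--
--     def decision(state, line):
--         # None = keep the line verbatim; n = prepend n spaces
--         in_block, indent = state
--         if is_header(line) or not in_block or not line.strip():
--             return None
--         if not line[0].isspace():
--             return None  # module-level line: it ends the block, keep as is
--         need = indent + 4 - indent_of(line)
--         return need if need > 0 else None
--
--     # pass 1: table of per-line states (state machine only, no output built)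
--     states = []
--     st = (False, 0)
--     for line in lines:
--         states.append(st)
--         st = step(st, line)
--
--     # pass 2: render from the table
--     def render(state, line):
--         d = decision(state, line)
--         return line if d is None else ' ' * d + line
--
--     return '\n'.join(render(s, line) for s, line in zip(states, lines))
-- ===== Notes on version B (the rewrite author's own statement) =====
-- stated objective: alternative
-- what changed: Replaces A's single loop that interleaves state updates with output building by a two-pass decomposition: a pure state-machine scan records a per-line decision table, then a separate render pass applies it and joins.
import Mathlib
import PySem

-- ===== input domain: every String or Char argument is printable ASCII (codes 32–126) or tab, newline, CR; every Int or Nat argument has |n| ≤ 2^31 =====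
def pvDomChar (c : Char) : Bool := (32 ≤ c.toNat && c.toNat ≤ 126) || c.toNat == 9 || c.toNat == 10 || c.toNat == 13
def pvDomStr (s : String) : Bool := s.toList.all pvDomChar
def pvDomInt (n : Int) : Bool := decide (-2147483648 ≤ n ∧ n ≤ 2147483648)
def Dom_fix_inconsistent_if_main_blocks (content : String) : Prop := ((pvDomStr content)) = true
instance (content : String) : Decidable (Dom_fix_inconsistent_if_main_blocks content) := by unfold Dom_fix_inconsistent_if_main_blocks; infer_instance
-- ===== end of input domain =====

-- B replaces A's single loop interleaving state updates with output building by a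
-- two-pass decomposition (state-table scan, then a pure render pass); same cost.

-- ===== PORT A =====
-- A's for-loop as the obvious structural recursion over the lines, same state
-- (fixed_lines accumulator, in_main_block, main_indent), branches in A's order.
def pvA_loop (acc : List (List Char)) (inb : Bool) (mi : Nat) : List (List Char) → List (List Char)
  | [] => acc
  | line :: rest =>
    if PySem.Chars.isIn "if __name__".toList line
        && PySem.Chars.startswith (PySem.Chars.strip line) "if __name__".toList then
      pvA_loop (acc ++ [line]) true (line.length - (PySem.Chars.lstrip line).length) rest
    else
      -- 'line[0]' is only reached when line.strip() is truthy, hence line ≠ []: headD is exact there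
      let inb' := if inb && !(PySem.Chars.strip line).isEmpty && !(PySem.Str.isspace (line.headD ' ')) then false else inb
      if inb' && !(PySem.Chars.strip line).isEmpty then
        let cur := line.length - (PySem.Chars.lstrip line).length
        if cur < mi + 4 then
          pvA_loop (acc ++ [List.replicate (mi + 4 - cur) ' ' ++ line]) inb' mi rest
        else pvA_loop (acc ++ [line]) inb' mi rest
      else pvA_loop (acc ++ [line]) inb' mi rest

def fix_inconsistent_if_main_blocks (content : String) : String :=
  String.ofList (PySem.Chars.join ['\n'] (pvA_loop [] false 0 (PySem.Chars.splitOn content.toList ['\n'])))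

-- ===== PORT B =====
def pvB_isHeader (line : List Char) : Bool :=
  PySem.Chars.isIn "if __name__".toList line
    && PySem.Chars.startswith (PySem.Chars.strip line) "if __name__".toList

def pvB_indentOf (line : List Char) : Nat := line.length - (PySem.Chars.lstrip line).length

def pvB_step (st : Bool × Nat) (line : List Char) : Bool × Nat :=
  if pvB_isHeader line then (true, pvB_indentOf line)
  else if st.1 && !(PySem.Chars.strip line).isEmpty && !(PySem.Str.isspace (line.headD ' ')) then (false, st.2)
  else st

def pvB_decision (st : Bool × Nat) (line : List Char) : Option Nat :=
  if pvB_isHeader line || !st.1 || (PySem.Chars.strip line).isEmpty then none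
  else if !(PySem.Str.isspace (line.headD ' ')) then none
  else
    let need := st.2 + 4 - pvB_indentOf line
    if need > 0 then some need else none

-- pass 1: table of per-line states
def pvB_states (st : Bool × Nat) : List (List Char) → List (Bool × Nat)
  | [] => []
  | line :: ls => st :: pvB_states (pvB_step st line) ls

-- pass 2: render one line from its recorded state
def pvB_render (st : Bool × Nat) (line : List Char) : List Char :=
  match pvB_decision st line with
  | none => line
  | some d => List.replicate d ' ' ++ line

def fix_inconsistent_if_main_blocks_alt (content : String) : String :=
  let lines := PySem.Chars.splitOn content.toList ['\n']
  String.ofList (PySem.Chars.join ['\n'] ((pvB_states (false, 0) lines).zipWith pvB_render lines))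

-- ===== PRECONDITION & SPEC =====
def Spec_fix_inconsistent_if_main_blocks (content : String) (out : String) : Prop := out = fix_inconsistent_if_main_blocks_alt content
instance (content : String) (out : String) : Decidable (Spec_fix_inconsistent_if_main_blocks content out) := by unfold Spec_fix_inconsistent_if_main_blocks; infer_instance

-- ===== CLAIM (what is proved, stated in full; the proofs are below) =====
def Claim_equal_fix_inconsistent_if_main_blocks : Prop := ∀ (content : String), Dom_fix_inconsistent_if_main_blocks content → Spec_fix_inconsistent_if_main_blocks content (fix_inconsistent_if_main_blocks content)

-- ===== LEMMAS AND PROOFS =====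
lemma pvA_loop_eq_states_render (ls : List (List Char)) :
    ∀ (acc : List (List Char)) (inb : Bool) (mi : Nat),
      pvA_loop acc inb mi ls = acc ++ (pvB_states (inb, mi) ls).zipWith pvB_render ls := by
  induction ls with
  | nil => intro acc inb mi; simp [pvA_loop, pvB_states]
  | cons line rest ih =>
    intro acc inb mi
    -- the header test, with "if __name__".toList evaluated to its char-list literal
    by_cases hh : (PySem.Chars.isIn ['i','f',' ','_','_','n','a','m','e','_','_'] line = true
        ∧ PySem.Chars.startswith (PySem.Chars.strip line) ['i','f',' ','_','_','n','a','m','e','_','_'] = true)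
    · simp [pvA_loop, pvB_states, pvB_step, pvB_render, pvB_decision, pvB_isHeader,
        pvB_indentOf, hh, ih]
    · by_cases hn : (PySem.Chars.strip line).isEmpty
      · -- blank line: state unchanged, line kept verbatim
        simp [pvA_loop, pvB_states, pvB_step, pvB_render, pvB_decision, pvB_isHeader, hh, hn, ih]
      · by_cases hb : inb
        · by_cases hs : PySem.Str.isspace (line.head?.getD ' ') = true
          · -- inside block, indented line: reindent iff under-indented
            by_cases hc : line.length - (PySem.Chars.lstrip line).length < mi + 4
            · have hneed : mi + 4 - (line.length - (PySem.Chars.lstrip line).length) > 0 := by omega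
              simp [pvA_loop, pvB_states, pvB_step, pvB_render, pvB_decision, pvB_isHeader,
                pvB_indentOf, hh, hn, hb, hs, hc, hneed, ih]
            · have hneed : ¬ (mi + 4 - (line.length - (PySem.Chars.lstrip line).length) > 0) := by omega
              simp [pvA_loop, pvB_states, pvB_step, pvB_render, pvB_decision, pvB_isHeader,
                pvB_indentOf, hh, hn, hb, hs, hc, hneed, ih]
          · -- module-level line ends the block
            simp [pvA_loop, pvB_states, pvB_step, pvB_render, pvB_decision, pvB_isHeader,
              hh, hn, hb, hs, ih]
        · simp [pvA_loop, pvB_states, pvB_step, pvB_render, pvB_decision, pvB_isHeader,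
            hh, hn, hb, ih]

-- ===== VERDICT (by name: the statement is the Claim_ definition above) =====
theorem fix_inconsistent_if_main_blocks_spec : Claim_equal_fix_inconsistent_if_main_blocks := by
  intro content _
  unfold Spec_fix_inconsistent_if_main_blocks fix_inconsistent_if_main_blocks
    fix_inconsistent_if_main_blocks_alt
  rw [pvA_loop_eq_states_render]
  simp
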